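-- pv_equiv track=rewrite | github.com/jzyismylover/indicator-backend | resources/en_readability/util/French_syllables.py | French_syllables_count
-- ===== SOURCE A (Python) =====
-- def French_syllables_count(word):
--     vowels = "aeiouy"
--     syllables = 0
--     last_was_vowel = False
--     for char in word:
--         if char in vowels:
--             if not last_was_vowel:
--                 syllables += 1
--             last_was_vowel = True
--         else:
--             last_was_vowel = False
--     if word.endswith("e"):
--         syllables -= 1
--     if word.endswith("le"):
--         syllables += 1
--     if syllables == 0:
--         syllables = 1
--     return syllables
-- ===== SOURCE B (Python) =====
-- def French_syllables_count(word):
--     vowels = set("aeiouy")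
--     flags = [c in vowels for c in word]
--     # runs = #vowels - #adjacent vowel pairs (each run of length k has k vowels, k-1 pairs)
--     syllables = sum(flags) - sum(a and b for a, b in zip(flags, flags[1:]))
--     if word.endswith("e"):
--         syllables -= 1
--     if word.endswith("le"):
--         syllables += 1
--     if syllables == 0:
--         syllables = 1
--     return syllables
-- ===== Notes on version B (the rewrite author's own statement) =====
-- stated objective: alternative
-- what changed: Drops the stateful per-character scan entirely: B computes the syllable count by the inclusion-exclusion identity runs = (#vowel characters) - (#adjacent vowel-vowel pairs), built from a flag list and a zip with its own tail; suffix adjustments and zero-floor unchanged.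
import Mathlib
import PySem

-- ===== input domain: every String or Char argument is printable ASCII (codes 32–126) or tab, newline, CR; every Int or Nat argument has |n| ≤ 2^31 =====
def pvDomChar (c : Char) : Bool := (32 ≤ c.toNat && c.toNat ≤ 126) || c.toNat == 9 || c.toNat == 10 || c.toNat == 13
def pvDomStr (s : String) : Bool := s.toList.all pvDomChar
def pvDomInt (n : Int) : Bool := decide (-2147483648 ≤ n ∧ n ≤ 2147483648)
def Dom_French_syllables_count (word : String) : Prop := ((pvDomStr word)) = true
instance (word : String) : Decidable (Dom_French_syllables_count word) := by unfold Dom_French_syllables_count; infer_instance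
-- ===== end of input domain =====

-- B abandons the stateful scan: syllables = (#vowel chars) - (#adjacent vowel pairs) by inclusion-exclusion; same suffix adjustments; alternative algorithm, same cost.

-- ===== PORT A =====
def fscVowel (c : Char) : Bool := "aeiouy".toList.contains c

-- A's for-loop: state (syllables, last_was_vowel)
def fscLoopA : List Char → Int → Bool → Int
  | [], s, _ => s
  | c :: cs, s, lv =>
    if fscVowel c then fscLoopA cs (if lv then s else s + 1) true
    else fscLoopA cs s false

def French_syllables_count (word : String) : Int :=
  let s1 := fscLoopA word.toList 0 false
  let s2 := if PySem.Str.endswith word "e" then s1 - 1 else s1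
  let s3 := if PySem.Str.endswith word "le" then s2 + 1 else s2
  if s3 = 0 then 1 else s3

-- ===== PORT B =====
-- sum(flags)
def fscSum : List Bool → Int
  | [] => 0
  | b :: bs => (if b then 1 else 0) + fscSum bs

-- sum(a and b for a, b in zip(flags, flags[1:]))
def fscPairSum : List Bool → Int
  | [] => 0
  | [_] => 0
  | a :: b :: bs => (if a && b then 1 else 0) + fscPairSum (b :: bs)

def French_syllables_count_alt (word : String) : Int :=
  let flags := word.toList.map fscVowel
  let s1 := fscSum flags - fscPairSum flags
  let s2 := if PySem.Str.endswith word "e" then s1 - 1 else s1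
  let s3 := if PySem.Str.endswith word "le" then s2 + 1 else s2
  if s3 = 0 then 1 else s3

-- ===== PRECONDITION & SPEC =====
def Spec_French_syllables_count (word : String) (out : Int) : Prop := out = French_syllables_count_alt word
instance (word : String) (out : Int) : Decidable (Spec_French_syllables_count word out) := by unfold Spec_French_syllables_count; infer_instance

-- ===== CLAIM (what is proved, stated in full; the proofs are below) =====
def Claim_equal_French_syllables_count : Prop := ∀ (word : String), Dom_French_syllables_count word → Spec_French_syllables_count word (French_syllables_count word)

-- ===== LEMMAS AND PROOFS =====

-- 1 if the first flag is set (the pending run the raised flag belongs to)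
def fscHead : List Bool → Int
  | [] => 0
  | b :: _ => if b then 1 else 0

-- A's flag-loop equals vowels-minus-pairs, with the raised flag absorbing the head run.
lemma fscLoopA_eq (l : List Char) : ∀ s : Int,
    fscLoopA l s true = s + fscSum (l.map fscVowel) - fscPairSum (l.map fscVowel)
      - fscHead (l.map fscVowel) ∧
    fscLoopA l s false = s + fscSum (l.map fscVowel) - fscPairSum (l.map fscVowel) := by
  induction l with
  | nil => intro s; simp [fscLoopA, fscSum, fscPairSum, fscHead]
  | cons c cs ih =>
    intro s
    cases cs with
    | nil =>
      by_cases h : fscVowel c = true <;>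
        simp [fscLoopA, fscSum, fscPairSum, fscHead, h]
    | cons d ds =>
      by_cases h : fscVowel c = true
      · refine ⟨?_, ?_⟩
        · rw [show fscLoopA (c :: d :: ds) s true = fscLoopA (d :: ds) s true from by
            simp [fscLoopA, h]]
          rw [(ih s).1]
          simp only [List.map_cons, fscSum, fscPairSum, fscHead, h]
          cases hd : fscVowel d <;> simp [hd] <;> ring
        · rw [show fscLoopA (c :: d :: ds) s false = fscLoopA (d :: ds) (s + 1) true from by
            simp [fscLoopA, h]]
          rw [(ih (s + 1)).1]
          simp only [List.map_cons, fscSum, fscPairSum, fscHead, h]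
          cases hd : fscVowel d <;> simp [hd] <;> ring
      · have hf : fscVowel c = false := by simpa using h
        have step : ∀ lv, fscLoopA (c :: d :: ds) s lv = fscLoopA (d :: ds) s false := by
          intro lv; simp [fscLoopA, hf]
        refine ⟨?_, ?_⟩ <;>
        · rw [step, (ih s).2]
          simp only [List.map_cons, fscSum, fscPairSum, fscHead, hf]
          simp

-- ===== VERDICT (by name: the statement is the Claim_ definition above) =====
theorem French_syllables_count_spec : Claim_equal_French_syllables_count := by
  intro word _
  unfold Spec_French_syllables_count French_syllables_count French_syllables_count_alt
  have h := (fscLoopA_eq word.toList 0).2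
  simp only [zero_add] at h
  rw [h]
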